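-- pv_equiv track=rewrite | github.com/jliversi/ReverseConway | prev_state_finder/drafts/3_pickle_draft/row_set_obj_gen.py | sqr_ints_to_row_ints
-- ===== SOURCE A (Python) =====
-- def nth_bin_dig(num, n):
--     return (num >> n) & 1
--
-- def sqr_ints_to_row_ints(num_list):
--     # Strategy: build up each row as a sum of powers of 2
--     # Start with first num, the only 3x3 you take all of, get first 2 cols
--     first = num_list[0]
--     row1 = nth_bin_dig(first, 8) + (2 * nth_bin_dig(first, 5))
--     row2 = nth_bin_dig(first, 7) + (2 * nth_bin_dig(first, 4))
--     row3 = nth_bin_dig(first, 6) + (2 * nth_bin_dig(first, 3))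
--
--     # then add on additional powers of 2
--     cur_exp = 2 # 1s and 2s place already built
--     for num in num_list:
--         row1 += (2**cur_exp) * nth_bin_dig(num,2)
--         row2 += (2**cur_exp) * nth_bin_dig(num,1)
--         row3 += (2**cur_exp) * nth_bin_dig(num,0)
--         cur_exp += 1
--
--     return (row1, row2, row3)
-- ===== SOURCE B (Python) =====
-- def sqr_ints_to_row_ints(num_list):
--     # Build each row MSB-first with shift accumulation instead of
--     # summing weighted powers of two.
--     first = num_list[0]
--
--     def build(hi):
--         row = 0
--         for num in reversed(num_list):
--             row = (row << 1) | ((num >> (hi - 3)) & 1)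
--         row = (row << 1) | ((first >> hi) & 1)
--         row = (row << 1) | ((first >> (hi + 3)) & 1)
--         return row
--
--     return (build(5), build(4), build(3))
-- ===== Notes on version B (the rewrite author's own statement) =====
-- stated objective: idiomatic
-- what changed: B builds each row most-significant-bit first over the reversed list with shift/or accumulation (row = (row<<1)|bit), instead of A's ascending sum of 2**cur_exp-weighted bits with an explicit exponent counter; the per-row construction is factored into one helper called for the three bit columns.
import Mathlib
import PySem

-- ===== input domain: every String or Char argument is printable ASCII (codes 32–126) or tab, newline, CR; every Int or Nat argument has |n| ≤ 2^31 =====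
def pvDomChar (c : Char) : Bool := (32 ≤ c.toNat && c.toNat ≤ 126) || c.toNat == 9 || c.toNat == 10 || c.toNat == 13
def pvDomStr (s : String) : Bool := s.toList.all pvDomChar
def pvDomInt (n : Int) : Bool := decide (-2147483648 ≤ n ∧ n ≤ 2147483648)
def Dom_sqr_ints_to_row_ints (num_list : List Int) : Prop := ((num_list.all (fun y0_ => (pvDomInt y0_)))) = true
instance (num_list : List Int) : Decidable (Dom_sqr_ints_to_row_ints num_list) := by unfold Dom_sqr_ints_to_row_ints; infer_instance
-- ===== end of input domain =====

-- B builds each row MSB-first over the reversed list with shift/or accumulation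
-- instead of A's ascending sum of 2**cur_exp-weighted bits (objective: idiomatic).

-- ===== PORT A =====
-- (num >> n) & 1; every call site passes a nonnegative literal for n, so n : Nat (exact)
def nth_bin_dig (num : Int) (n : Nat) : Int :=
  PySem.Int.band (PySem.Int.floordiv num (2 ^ n)) 1

def sqr_ints_to_row_ints (num_list : List Int) : Int × Int × Int :=
  match num_list with
  | [] => (0, 0, 0)   -- Python raises IndexError on num_list[0]; excluded by Pre_
  | first :: _ =>
    let row1 := nth_bin_dig first 8 + 2 * nth_bin_dig first 5
    let row2 := nth_bin_dig first 7 + 2 * nth_bin_dig first 4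
    let row3 := nth_bin_dig first 6 + 2 * nth_bin_dig first 3
    -- cur_exp starts at 2 and only increments, so it is kept as a Nat counter (exact)
    let st := num_list.foldl
      (fun (s : Int × Int × Int × Nat) num =>
        (s.1 + 2 ^ s.2.2.2 * nth_bin_dig num 2,
         s.2.1 + 2 ^ s.2.2.2 * nth_bin_dig num 1,
         s.2.2.1 + 2 ^ s.2.2.2 * nth_bin_dig num 0,
         s.2.2.2 + 1))
      (row1, row2, row3, 2)
    (st.1, st.2.1, st.2.2.1)

-- ===== PORT B =====
-- row << 1 is ported as 2 * row (exact for every int); >> and & via PySem bitwise/floordiv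
def pvBuildRow (num_list : List Int) (first : Int) (hi : Nat) : Int :=
  let row := num_list.reverse.foldl
    (fun row num =>
      PySem.Int.bor (2 * row) (PySem.Int.band (PySem.Int.floordiv num (2 ^ (hi - 3))) 1)) 0
  let row := PySem.Int.bor (2 * row) (PySem.Int.band (PySem.Int.floordiv first (2 ^ hi)) 1)
  PySem.Int.bor (2 * row) (PySem.Int.band (PySem.Int.floordiv first (2 ^ (hi + 3))) 1)

def sqr_ints_to_row_ints_alt (num_list : List Int) : Int × Int × Int :=
  match num_list with
  | [] => (0, 0, 0)   -- Python raises IndexError on num_list[0]; excluded by Pre_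
  | first :: _ =>
    (pvBuildRow num_list first 5, pvBuildRow num_list first 4, pvBuildRow num_list first 3)

-- ===== PRECONDITION & SPEC =====
-- Python A (and B) raise IndexError on the empty list; only that input is excluded.
def Pre_sqr_ints_to_row_ints (num_list : List Int) : Prop := num_list ≠ []
instance (num_list : List Int) : Decidable (Pre_sqr_ints_to_row_ints num_list) := by
  unfold Pre_sqr_ints_to_row_ints; infer_instance

def pvWitness_sqr_ints_to_row_ints : List Int := [341]

def Spec_sqr_ints_to_row_ints (num_list : List Int) (out : Int × Int × Int) : Prop := out = sqr_ints_to_row_ints_alt num_list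
instance (num_list : List Int) (out : Int × Int × Int) : Decidable (Spec_sqr_ints_to_row_ints num_list out) := by unfold Spec_sqr_ints_to_row_ints; infer_instance

-- ===== CLAIM (what is proved, stated in full; the proofs are below) =====
def Claim_equal_sqr_ints_to_row_ints : Prop := ∀ (num_list : List Int), Dom_sqr_ints_to_row_ints num_list → Pre_sqr_ints_to_row_ints num_list → Spec_sqr_ints_to_row_ints num_list (sqr_ints_to_row_ints num_list)

-- ===== LEMMAS AND PROOFS =====

-- bit c num = (num >> c) & 1, the shared bit extraction of both programs
def pvBit (c : Nat) (num : Int) : Int := PySem.Int.band (PySem.Int.floordiv num (2 ^ c)) 1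

lemma pvBit_nonneg (c : Nat) (num : Int) : 0 ≤ pvBit c num := by
  unfold pvBit
  rw [PySem.Int.band_one]
  exact PySem.Int.mod_nonneg _ (by norm_num)

lemma pvBit_le_one (c : Nat) (num : Int) : pvBit c num ≤ 1 := by
  unfold pvBit
  rw [PySem.Int.band_one]
  have := PySem.Int.mod_lt (PySem.Int.floordiv num (2 ^ c)) (b := 2) (by norm_num)
  omega

lemma two_mul_lor_one (m : Nat) : 2 * m ||| 1 = 2 * m + 1 := by
  have h := Nat.lor_bit false m true 0
  simpa [Nat.bit] using h

lemma bor_two_mul (r b : Int) (hr : 0 ≤ r) (hb0 : 0 ≤ b) (hb1 : b ≤ 1) :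
    PySem.Int.bor (2 * r) b = 2 * r + b := by
  rw [PySem.Int.bor_of_nonneg (by omega) hb0]
  have h2 : (2 * r).toNat = 2 * r.toNat := by omega
  interval_cases b
  · simp only [Int.toNat_zero, Nat.or_zero]
    omega
  · rw [h2]
    simp only [Int.toNat_one, two_mul_lor_one]
    omega

-- the weighted bit sum Σ 2^i · bit c (l[i])
def pvS (c : Nat) : List Int → Int
  | [] => 0
  | y :: ys => pvBit c y + 2 * pvS c ys

lemma pvS_nonneg (c : Nat) (l : List Int) : 0 ≤ pvS c l := by
  induction l with
  | nil => simp [pvS]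
  | cons y ys ih => have := pvBit_nonneg c y; simp only [pvS]; omega

-- B's MSB-first fold over the reversed list computes r·2^|l| + pvS c l
lemma pvB_fold (c : Nat) (l : List Int) (r : Int) (hr : 0 ≤ r) :
    l.reverse.foldl (fun row num =>
      PySem.Int.bor (2 * row) (PySem.Int.band (PySem.Int.floordiv num (2 ^ c)) 1)) r
      = r * 2 ^ l.length + pvS c l := by
  induction l generalizing r with
  | nil => simp [pvS]
  | cons y ys ih =>
    have hprev : 0 ≤ r * 2 ^ ys.length + pvS c ys := by
      have := pvS_nonneg c ys
      positivity
    simp only [List.reverse_cons, List.foldl_append, ih r hr, List.foldl_cons, List.foldl_nil]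
    rw [show PySem.Int.band (PySem.Int.floordiv y (2 ^ c)) 1 = pvBit c y from rfl]
    rw [bor_two_mul _ _ hprev (pvBit_nonneg c y) (pvBit_le_one c y)]
    simp only [pvS, List.length_cons]
    ring

-- A's accumulator fold adds 2^e · pvS to each row and advances the exponent by the length
lemma pvA_fold (l : List Int) (r1 r2 r3 : Int) (e : Nat) :
    l.foldl
      (fun (s : Int × Int × Int × Nat) num =>
        (s.1 + 2 ^ s.2.2.2 * nth_bin_dig num 2,
         s.2.1 + 2 ^ s.2.2.2 * nth_bin_dig num 1,
         s.2.2.1 + 2 ^ s.2.2.2 * nth_bin_dig num 0,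
         s.2.2.2 + 1)) (r1, r2, r3, e)
      = (r1 + 2 ^ e * pvS 2 l, r2 + 2 ^ e * pvS 1 l, r3 + 2 ^ e * pvS 0 l, e + l.length) := by
  induction l generalizing r1 r2 r3 e with
  | nil => simp [pvS]
  | cons y ys ih =>
    rw [List.foldl_cons, ih]
    simp only [pvS, List.length_cons, Prod.mk.injEq, nth_bin_dig]
    refine ⟨?_, ?_, ?_, by omega⟩ <;> (unfold pvBit; rw [pow_succ]; ring)

lemma pvRow_eq (L : List Int) (first : Int) (hi : Nat) :
    pvBuildRow L first hi
      = pvBit (hi + 3) first + 2 * pvBit hi first + 2 ^ 2 * pvS (hi - 3) L := by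
  have hS := pvS_nonneg (hi - 3) L
  have hb5 := pvBit_nonneg hi first
  unfold pvBuildRow
  rw [pvB_fold (hi - 3) L 0 le_rfl]
  simp only [zero_mul, zero_add]
  have e1 : PySem.Int.bor (2 * pvS (hi - 3) L)
      (PySem.Int.band (PySem.Int.floordiv first (2 ^ hi)) 1)
      = 2 * pvS (hi - 3) L + pvBit hi first :=
    bor_two_mul _ _ hS (pvBit_nonneg _ _) (pvBit_le_one _ _)
  rw [e1]
  have e2 : PySem.Int.bor (2 * (2 * pvS (hi - 3) L + pvBit hi first))
      (PySem.Int.band (PySem.Int.floordiv first (2 ^ (hi + 3))) 1)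
      = 2 * (2 * pvS (hi - 3) L + pvBit hi first) + pvBit (hi + 3) first :=
    bor_two_mul _ _ (by omega) (pvBit_nonneg _ _) (pvBit_le_one _ _)
  rw [e2]
  ring

-- ===== VERDICT (by name: the statement is the Claim_ definition above) =====
theorem sqr_ints_to_row_ints_spec : Claim_equal_sqr_ints_to_row_ints := by
  intro num_list _ hpre
  unfold Spec_sqr_ints_to_row_ints
  match num_list with
  | [] => exact absurd rfl hpre
  | first :: rest =>
    simp only [sqr_ints_to_row_ints, sqr_ints_to_row_ints_alt, pvA_fold, pvRow_eq]
    refine Prod.ext ?_ (Prod.ext ?_ ?_) <;>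
      (simp only [nth_bin_dig, pvBit]; try norm_num; try ring)
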